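-- pv_equiv track=rewrite | github.com/HugoTCaballero/prpd-gui | PRPDapp/main - copia (2).py | _format_decile_token
-- ===== SOURCE A (Python) =====
-- def _format_decile_token(values: tuple[int, ...]) -> str:
--     if not values:
--         return "0"
--     vals = sorted(int(v) for v in values)
--     if not vals:
--         return "0"
--     contiguous = vals == list(range(vals[0], vals[-1] + 1))
--     if contiguous:
--         return f"{vals[0]}{vals[-1]}"
--     return "".join(str(v) for v in vals)
-- ===== SOURCE B (Python) =====
-- def _format_decile_token(values: tuple[int, ...]) -> str:
--     # One linear pass over the sorted values: check adjacency and collect the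
--     # string parts simultaneously, instead of materializing a range list.
--     if not values:
--         return "0"
--     vals = sorted(int(v) for v in values)
--     if not vals:
--         return "0"
--     first = vals[0]
--     prev = first
--     contiguous = True
--     parts = [str(first)]
--     for v in vals[1:]:
--         contiguous = contiguous and (v - prev == 1)
--         parts.append(str(v))
--         prev = v
--     if contiguous:
--         return f"{first}{prev}"
--     return "".join(parts)
-- ===== Notes on version B (the rewrite author's own statement) =====
-- stated objective: alternative
-- what changed: Replaces the equality test against a materialized range list with a single accumulator loop over the sorted values that checks adjacent gaps and builds the joined parts in one pass.
import Mathlib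
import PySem

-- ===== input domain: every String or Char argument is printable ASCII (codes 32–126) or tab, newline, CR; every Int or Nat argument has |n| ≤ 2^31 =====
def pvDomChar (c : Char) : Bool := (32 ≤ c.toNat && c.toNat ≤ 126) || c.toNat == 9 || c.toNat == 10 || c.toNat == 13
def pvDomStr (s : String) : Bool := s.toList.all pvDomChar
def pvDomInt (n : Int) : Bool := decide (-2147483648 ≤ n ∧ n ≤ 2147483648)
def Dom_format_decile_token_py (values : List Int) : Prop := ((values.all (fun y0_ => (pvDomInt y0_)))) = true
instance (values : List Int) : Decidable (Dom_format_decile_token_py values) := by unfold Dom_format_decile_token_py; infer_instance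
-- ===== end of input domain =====

-- B replaces A's range-list equality test with a single accumulator scan over the sorted values (alternative decomposition, same cost class).


-- ===== PORT A =====
def format_decile_token_py (values : List Int) : String :=
  if values = [] then "0"
  else
    match PySem.List.sorted values (fun x => x) false with
    | [] => "0"
    | v0 :: rest =>
      let last := (v0 :: rest).getLast (List.cons_ne_nil _ _)
      if (v0 :: rest) = PySem.List.pyRange v0 (last + 1) 1 then
        PySem.Int.toStr v0 ++ PySem.Int.toStr last
      else
        PySem.Str.join "" ((v0 :: rest).map PySem.Int.toStr)

-- ===== PORT B =====
-- loop state: (prev, contiguous, parts), exactly Source B's for-loop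
def fdtLoop : Int → List Int → Bool → List String → Int × Bool × List String
  | prev, [], c, parts => (prev, c, parts)
  | prev, v :: rest, c, parts =>
      fdtLoop v rest (c && decide (v - prev = 1)) (parts ++ [PySem.Int.toStr v])

def format_decile_token_py_alt (values : List Int) : String :=
  if values = [] then "0"
  else
    match PySem.List.sorted values (fun x => x) false with
    | [] => "0"
    | v0 :: rest =>
      let r := fdtLoop v0 rest true [PySem.Int.toStr v0]
      if r.2.1 then PySem.Int.toStr v0 ++ PySem.Int.toStr r.1
      else PySem.Str.join "" r.2.2

-- ===== PRECONDITION & SPEC =====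
def Spec_format_decile_token_py (values : List Int) (out : String) : Prop := out = format_decile_token_py_alt values
instance (values : List Int) (out : String) : Decidable (Spec_format_decile_token_py values out) := by unfold Spec_format_decile_token_py; infer_instance

-- ===== CLAIM (what is proved, stated in full; the proofs are below) =====
def Claim_equal_format_decile_token_py : Prop := ∀ (values : List Int), Dom_format_decile_token_py values → Spec_format_decile_token_py values (format_decile_token_py values)

-- ===== LEMMAS AND PROOFS =====

theorem fdtLoop_parts (rest : List Int) (prev : Int) (c : Bool) (parts : List String) :
    (fdtLoop prev rest c parts).2.2 = parts ++ rest.map PySem.Int.toStr := by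
  induction rest generalizing prev c parts with
  | nil => simp [fdtLoop]
  | cons v r ih => simp [fdtLoop, ih]

theorem fdtLoop_prev (rest : List Int) (prev : Int) (c : Bool) (parts : List String) :
    (fdtLoop prev rest c parts).1 = (prev :: rest).getLast (List.cons_ne_nil _ _) := by
  induction rest generalizing prev c parts with
  | nil => simp [fdtLoop]
  | cons v r ih => simpa [fdtLoop, List.getLast_cons] using ih v _ _

def fdtChain : Int → List Int → Bool
  | _, [] => true
  | prev, v :: rest => decide (v - prev = 1) && fdtChain v rest

theorem fdtLoop_flag (rest : List Int) (prev : Int) (c : Bool) (parts : List String) :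
    (fdtLoop prev rest c parts).2.1 = (c && fdtChain prev rest) := by
  induction rest generalizing prev c parts with
  | nil => simp [fdtLoop, fdtChain]
  | cons v r ih => simp [fdtLoop, fdtChain, ih, Bool.and_assoc]

theorem fdtChain_iff_range (rest : List Int) (v0 : Int) :
    fdtChain v0 rest = true ↔
      (v0 :: rest) = PySem.List.pyRange v0 (((v0 :: rest).getLast (List.cons_ne_nil _ _)) + 1) 1 := by
  induction rest generalizing v0 with
  | nil =>
    simp [fdtChain, PySem.List.pyRange_one_singleton]
  | cons v r ih =>
    rw [List.getLast_cons (List.cons_ne_nil _ _)]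
    set L := (v :: r).getLast (List.cons_ne_nil _ _) with hL
    constructor
    · intro h
      simp only [fdtChain, Bool.and_eq_true, decide_eq_true_eq] at h
      obtain ⟨hv, hch⟩ := h
      have hvr := (ih v).mp hch
      have hne : PySem.List.pyRange v (L + 1) 1 ≠ [] := by rw [← hvr]; simp
      have hvlt : v < L + 1 := by
        by_contra hle
        exact hne (PySem.List.pyRange_one_eq_nil (by omega))
      have h0 : v0 < L + 1 := by omega
      rw [PySem.List.pyRange_one_cons h0]
      have : v0 + 1 = v := by omega
      rw [this, ← hvr]
    · intro h
      have h0 : v0 < L + 1 := by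
        by_contra hle
        rw [PySem.List.pyRange_one_eq_nil (by omega)] at h
        exact (List.cons_ne_nil _ _) h
      rw [PySem.List.pyRange_one_cons h0] at h
      have hv : v = v0 + 1 := by
        have := (List.cons.injEq _ _ _ _).mp h
        have htail := this.2
        by_cases h1 : v0 + 1 < L + 1
        · rw [PySem.List.pyRange_one_cons h1] at htail
          exact ((List.cons.injEq _ _ _ _).mp htail).1
        · rw [PySem.List.pyRange_one_eq_nil (by omega)] at htail
          exact absurd htail (List.cons_ne_nil _ _)
      have htail : v :: r = PySem.List.pyRange v (L + 1) 1 := by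
        have := (List.cons.injEq _ _ _ _).mp h
        rw [← hv] at this
        exact this.2
      simp only [fdtChain, Bool.and_eq_true, decide_eq_true_eq]
      exact ⟨by omega, (ih v).mpr htail⟩

-- ===== VERDICT (by name: the statement is the Claim_ definition above) =====
theorem format_decile_token_py_spec : Claim_equal_format_decile_token_py := by
  intro values _
  unfold Spec_format_decile_token_py format_decile_token_py format_decile_token_py_alt
  by_cases hv : values = []
  · simp [hv]
  · simp only [if_neg hv]
    cases hs : PySem.List.sorted values (fun x => x) false with
    | nil => rfl
    | cons v0 rest =>
      simp only [fdtLoop_flag, fdtLoop_prev, fdtLoop_parts, Bool.true_and]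
      by_cases hc : fdtChain v0 rest = true
      · rw [if_pos ((fdtChain_iff_range rest v0).mp hc), if_pos hc]
      · rw [if_neg (fun h => hc ((fdtChain_iff_range rest v0).mpr h)),
            if_neg (by simpa using hc)]
        simp
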